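-- pv_equiv track=rewrite | github.com/GVkyiv/Final-Project-Google | personal_assistant/ui/contacts_view.py | _format_birthday_input
-- ===== SOURCE A (Python) =====
-- def _format_birthday_input(raw: str) -> str:
--     digits = "".join(ch for ch in str(raw or "") if ch.isdigit())[:8]
--     if not digits:
--         return ""
--     if len(digits) <= 2:
--         return f"{digits}/" if len(digits) == 2 else digits
--     if len(digits) <= 4:
--         body = f"{digits[:2]}/{digits[2:]}"
--         return f"{body}/" if len(digits) == 4 else body
--     return f"{digits[:2]}/{digits[2:4]}/{digits[4:]}"
-- ===== SOURCE B (Python) =====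
-- def _format_birthday_input(raw: str) -> str:
--     digits = "".join(ch for ch in str(raw or "") if ch.isdigit())[:8]
--     out = []
--     for i, ch in enumerate(digits):
--         if i == 2 or i == 4:
--             out.append("/")
--         out.append(ch)
--     if len(digits) == 2 or len(digits) == 4:
--         out.append("/")
--     return "".join(out)
-- ===== Notes on version B (the rewrite author's own statement) =====
-- stated objective: alternative
-- what changed: Replaces A's chain of length-based branches with slice formatting by a single enumerate pass that inserts a slash before positions 2 and 4 plus a trailing slash at lengths 2 and 4.
import Mathlib
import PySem

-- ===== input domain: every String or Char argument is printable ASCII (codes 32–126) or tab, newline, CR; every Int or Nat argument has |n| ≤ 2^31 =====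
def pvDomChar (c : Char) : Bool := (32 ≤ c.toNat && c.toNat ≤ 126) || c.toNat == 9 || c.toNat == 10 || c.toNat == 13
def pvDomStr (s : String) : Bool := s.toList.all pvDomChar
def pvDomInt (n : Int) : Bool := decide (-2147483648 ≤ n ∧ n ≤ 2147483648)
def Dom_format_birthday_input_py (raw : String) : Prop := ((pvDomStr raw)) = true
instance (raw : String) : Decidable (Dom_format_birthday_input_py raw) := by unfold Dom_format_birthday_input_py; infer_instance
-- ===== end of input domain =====

-- B replaces A's length-branching format cases with a single enumerate pass that inserts a slash before
-- positions 2 and 4 (plus the trailing slash at lengths 2 and 4): a different decomposition, not faster.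

-- ===== PORT A =====
def format_birthday_input_py (raw : String) : String :=
  let digits := PySem.List.slice ((if raw = "" then "" else raw).toList.filter PySem.Chars.isdigit) none (some 8)
  if digits.isEmpty then ""
  else if digits.length ≤ 2 then
    (if digits.length = 2 then String.ofList (digits ++ ['/']) else String.ofList digits)
  else if digits.length ≤ 4 then
    let body := PySem.List.slice digits none (some 2) ++ ['/'] ++ PySem.List.slice digits (some 2) none
    (if digits.length = 4 then String.ofList (body ++ ['/']) else String.ofList body)
  else
    String.ofList (PySem.List.slice digits none (some 2) ++ ['/'] ++
               PySem.List.slice digits (some 2) (some 4) ++ ['/'] ++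
               PySem.List.slice digits (some 4) none)

-- ===== PORT B =====
def format_birthday_input_py_alt (raw : String) : String :=
  let digits := PySem.List.slice ((if raw = "" then "" else raw).toList.filter PySem.Chars.isdigit) none (some 8)
  let out := (PySem.List.enumerate digits).foldl
    (fun acc p => (acc ++ (if p.1 = 2 ∨ p.1 = 4 then ['/'] else [])) ++ [p.2]) []
  String.ofList (out ++ (if digits.length = 2 ∨ digits.length = 4 then ['/'] else []))

-- ===== PRECONDITION & SPEC =====
def Spec_format_birthday_input_py (raw : String) (out : String) : Prop := out = format_birthday_input_py_alt raw
instance (raw : String) (out : String) : Decidable (Spec_format_birthday_input_py raw out) := by unfold Spec_format_birthday_input_py; infer_instance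

-- ===== CLAIM (what is proved, stated in full; the proofs are below) =====
def Claim_equal_format_birthday_input_py : Prop := ∀ (raw : String), Dom_format_birthday_input_py raw → Spec_format_birthday_input_py raw (format_birthday_input_py raw)

-- ===== LEMMAS AND PROOFS =====
lemma fb_core (ds : List Char) (h : ds.length ≤ 8) :
    (if ds.isEmpty then ""
     else if ds.length ≤ 2 then
       (if ds.length = 2 then String.ofList (ds ++ ['/']) else String.ofList ds)
     else if ds.length ≤ 4 then
       let body := PySem.List.slice ds none (some 2) ++ ['/'] ++ PySem.List.slice ds (some 2) none
       (if ds.length = 4 then String.ofList (body ++ ['/']) else String.ofList body)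
     else
       String.ofList (PySem.List.slice ds none (some 2) ++ ['/'] ++
                  PySem.List.slice ds (some 2) (some 4) ++ ['/'] ++
                  PySem.List.slice ds (some 4) none)) =
    String.ofList (((PySem.List.enumerate ds).foldl
        (fun acc p => (acc ++ (if p.1 = 2 ∨ p.1 = 4 then ['/'] else [])) ++ [p.2]) []) ++
      (if ds.length = 2 ∨ ds.length = 4 then ['/'] else [])) := by
  match ds with
  | [] => simp [PySem.List.enumerate]
  | [a] => simp [PySem.List.enumerate]
  | [a,b] => simp [PySem.List.enumerate]
  | [a,b,c] => simp [PySem.List.enumerate, PySem.List.slice]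
  | [a,b,c,d] => simp [PySem.List.enumerate, PySem.List.slice]
  | [a,b,c,d,e] => simp [PySem.List.enumerate, PySem.List.slice]
  | [a,b,c,d,e,f] => simp [PySem.List.enumerate, PySem.List.slice]
  | [a,b,c,d,e,f,g] => simp [PySem.List.enumerate, PySem.List.slice]
  | [a,b,c,d,e,f,g,i] => simp [PySem.List.enumerate, PySem.List.slice]
  | a::b::c::d::e::f::g::i::j::t => simp at h; omega

-- ===== VERDICT (by name: the statement is the Claim_ definition above) =====
theorem format_birthday_input_py_spec : Claim_equal_format_birthday_input_py := by
  intro raw _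
  unfold Spec_format_birthday_input_py format_birthday_input_py format_birthday_input_py_alt
  apply fb_core
  rw [PySem.List.slice_to _ (by norm_num)]
  simp
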